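-- pv_equiv track=rewrite | github.com/kimyeoju/CodingTest | 프로그래머스/0/120843. 공 던지기/공 던지기.py | solution
-- ===== SOURCE A (Python) =====
-- def solution(numbers, k):
--     n = len(numbers)
--     current = 0
--
--     for i in range(k - 1):
--         current += 2
--
--         if current >= n:
--             current -= n
--
--     return numbers[current]
-- ===== SOURCE B (Python) =====
-- def solution(numbers, k):
--     return numbers[2 * max(k - 1, 0) % len(numbers)]
-- ===== Notes on version B (the rewrite author's own statement) =====
-- stated objective: simpler
-- what changed: replaces the O(k) step-by-step throwing loop with the closed-form modular index 2*max(k-1,0) % len(numbers) (one line)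
import Mathlib
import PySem

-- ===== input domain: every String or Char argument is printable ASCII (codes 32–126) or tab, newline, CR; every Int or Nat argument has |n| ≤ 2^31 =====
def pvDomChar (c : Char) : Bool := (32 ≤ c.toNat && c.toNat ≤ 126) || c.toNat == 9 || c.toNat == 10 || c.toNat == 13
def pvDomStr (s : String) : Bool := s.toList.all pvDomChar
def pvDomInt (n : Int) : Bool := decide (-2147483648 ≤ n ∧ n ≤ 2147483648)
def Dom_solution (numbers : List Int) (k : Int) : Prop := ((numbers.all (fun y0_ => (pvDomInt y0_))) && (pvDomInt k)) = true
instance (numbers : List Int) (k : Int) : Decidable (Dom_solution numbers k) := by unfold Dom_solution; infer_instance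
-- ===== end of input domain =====

-- B replaces A's step-by-step throwing loop with the one-line closed-form modular index
-- 2*max(k-1,0) % n (simpler); equivalence is about the return value, nothing is mutated.

-- ===== PORT A =====
def solution (numbers : List Int) (k : Int) : Int :=
  let n : Int := numbers.length
  let current : Int :=
    (PySem.List.pyRange 0 (k - 1) 1).foldl
      (fun current _ =>
        let current := current + 2
        if current ≥ n then current - n else current) 0
  PySem.List.pyGetD numbers current 0

-- ===== PORT B =====
def solution_alt (numbers : List Int) (k : Int) : Int :=
  PySem.List.pyGetD numbers (PySem.Int.mod (2 * max (k - 1) 0) numbers.length) 0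

-- ===== PRECONDITION & SPEC =====
-- Pre_ excludes exactly the inputs where A raises IndexError: the empty list, and a
-- one-element list with k ≥ 2 (A's single wrap-around subtraction cannot keep the index below 1).
def Pre_solution (numbers : List Int) (k : Int) : Prop :=
  numbers ≠ [] ∧ (numbers.length = 1 → k ≤ 1)
instance (numbers : List Int) (k : Int) : Decidable (Pre_solution numbers k) := by
  unfold Pre_solution; infer_instance

def pvWitness_solution : List Int × Int := ([10, 20, 30, 40], 5)

def Spec_solution (numbers : List Int) (k : Int) (out : Int) : Prop := out = solution_alt numbers k
instance (numbers : List Int) (k : Int) (out : Int) : Decidable (Spec_solution numbers k out) := by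
  unfold Spec_solution; infer_instance

-- ===== CLAIM (what is proved, stated in full; the proofs are below) =====
def Claim_equal_solution : Prop := ∀ (numbers : List Int) (k : Int), Dom_solution numbers k → Pre_solution numbers k → Spec_solution numbers k (solution numbers k)

-- ===== LEMMAS AND PROOFS =====

-- A's loop body, wrapped once modulo n: running it over any list of length L starting
-- from c with 0 ≤ c < n and 2 ≤ n lands at (c + 2*L) % n.
theorem pv_loop_mod (n : Int) (hn : 2 ≤ n) (l : List Int) :
    ∀ c : Int, 0 ≤ c → c < n →
      l.foldl (fun current _ =>
        if current + 2 ≥ n then current + 2 - n else current + 2) c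
      = (c + 2 * l.length) % n := by
  induction l with
  | nil => intro c h0 h1; simp [Int.emod_eq_of_lt h0 h1]
  | cons x xs ih =>
    intro c h0 h1
    simp only [List.foldl_cons, List.length_cons]
    have hstep : (if c + 2 ≥ n then c + 2 - n else c + 2) = (c + 2) % n := by
      split_ifs with h
      · rw [← Int.sub_emod_right (c + 2) n, Int.emod_eq_of_lt (by omega) (by omega)]
      · rw [Int.emod_eq_of_lt (by omega) (by omega)]
    have h0' : 0 ≤ (c + 2) % n := Int.emod_nonneg _ (by omega)
    have h1' : (c + 2) % n < n := Int.emod_lt_of_pos _ (by omega)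
    rw [hstep, ih _ h0' h1', Int.emod_add_emod]
    push_cast
    ring_nf

theorem solution_spec : Claim_equal_solution := by
  intro numbers k _ hpre
  obtain ⟨hne, h1⟩ := hpre
  unfold Spec_solution
  have hnpos : 0 < numbers.length := List.length_pos_iff.mpr hne
  have hmod : ∀ a : Int, PySem.Int.mod a (numbers.length : Int) = a % (numbers.length : Int) := by
    intro a
    simp [PySem.Int.mod, Int.fmod_eq_emod]
  simp only [solution, solution_alt]
  by_cases hk : k - 1 ≤ 0
  · -- loop never runs: pyRange is empty, index 0 on both sides
    rw [PySem.List.pyRange_one_eq_nil (by omega)]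
    rw [show max (k - 1) 0 = 0 by omega]
    simp [hmod]
  · -- loop runs; Pre_ forces n ≥ 2 here, and the loop computes (2*(k-1)) % n
    have hn2 : 2 ≤ (numbers.length : Int) := by
      rcases Nat.lt_or_ge numbers.length 2 with h | h
      · exfalso; omega
      · exact_mod_cast h
    rw [pv_loop_mod _ hn2 _ 0 le_rfl (by omega)]
    rw [PySem.List.length_pyRange_one, hmod]
    rw [show (((k - 1 - 0).toNat : Int)) = max (k - 1) 0 by omega]
    ring_nf
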